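-- pv_equiv track=rewrite | github.com/eagledot/hachi | images/fuzzy_search/fuzzy_search.py | augment_data
-- ===== SOURCE A (Python) =====
-- def augment_data(data:str) -> str:
--     FREQUENCY = "etaonrishdlfcmugypwbvkjxzq"
--     sample_dict = {}
--     for i, character in enumerate(FREQUENCY):
--         sample_dict[character] = FREQUENCY[len(FREQUENCY) -1 -i]
--
--     random_string = "this is {}-{}-{} destined to be a value, otherwise would not have enough variation to begin with in the first place."
--
--     for d in data:
--         random_string = random_string.replace(d,"*")
--
--     new_data = ""
--     for d in data:
--         if d in sample_dict:
--             new_data += sample_dict[d]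
--         else:
--             new_data += d
--
--     return random_string.format(new_data, new_data, new_data )
-- ===== SOURCE B (Python) =====
-- def augment_data(data: str) -> str:
--     FREQUENCY = "etaonrishdlfcmugypwbvkjxzq"
--     trans = {c: FREQUENCY[-1 - i] for i, c in enumerate(FREQUENCY)}
--     present = set(data)
--     template = "this is {}-{}-{} destined to be a value, otherwise would not have enough variation to begin with in the first place."
--     masked = ''.join('*' if c in present else c for c in template)
--     new_data = ''.join(trans.get(c, c) for c in data)
--     return masked.format(new_data, new_data, new_data)
-- ===== Notes on version B (the rewrite author's own statement) =====
-- stated objective: idiomatic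
-- what changed: B masks by a single pass over the template with a set-membership test (instead of A's repeated str.replace over the template, once per character of data) and builds the substituted data by joining per-character dict lookups from a comprehension-built reversed-frequency map, instead of A's string-concatenation loop with an explicit membership branch.
-- outside the precondition, e.g. on augment_data('{'): A raises ValueError, B raises ValueError; on augment_data('}'): A raises ValueError, B raises ValueError
import Mathlib
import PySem

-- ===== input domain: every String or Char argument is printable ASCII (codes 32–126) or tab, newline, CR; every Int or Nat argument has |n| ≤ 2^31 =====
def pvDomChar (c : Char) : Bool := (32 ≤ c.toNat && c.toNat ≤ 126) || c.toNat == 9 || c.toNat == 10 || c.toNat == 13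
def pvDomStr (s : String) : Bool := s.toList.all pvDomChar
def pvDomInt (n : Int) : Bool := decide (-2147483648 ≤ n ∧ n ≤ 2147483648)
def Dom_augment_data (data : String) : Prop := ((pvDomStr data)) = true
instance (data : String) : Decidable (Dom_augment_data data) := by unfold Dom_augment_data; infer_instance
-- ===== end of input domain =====

-- B masks the template in one pass with a set-membership test and substitutes via joined dict lookups,
-- instead of A's repeated str.replace and string-concatenation loop (objective: idiomatic).

-- shared literal constants (the FREQUENCY string and the template literal of both Pythons)
def pvFreq : List Char := "etaonrishdlfcmugypwbvkjxzq".toList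
def pvTemplate : List Char := "this is {}-{}-{} destined to be a value, otherwise would not have enough variation to begin with in the first place.".toList
-- hand port of str.format with positional "{}" fields, substituted left to right; exact whenever every
-- '{' / '}' of the string occurs as a "{}" pair with an argument available — guaranteed under Pre_ below
-- (Python raises ValueError on a stray brace, which Pre_ excludes).
def pvFmt : List Char → List (List Char) → List Char
  | [], _ => []
  | '{' :: '}' :: rest, a :: args => a ++ pvFmt rest args
  | c :: rest, args => c :: pvFmt rest args

-- ===== PORT A =====
def pvSampleDict : PySem.Dict Char Char :=
  (PySem.List.enumerate pvFreq 0).foldl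
    (fun d p => d.insert p.2 (PySem.List.pyGetD pvFreq (PySem.List.len pvFreq - 1 - p.1) ' '))
    PySem.Dict.empty

def augment_data (data : String) : String :=
  let random_string := data.toList.foldl (fun s d => PySem.Chars.replace s [d] ['*']) pvTemplate
  let new_data := data.toList.foldl
    (fun nd d => if pvSampleDict.contains d then nd ++ [pvSampleDict.getD d d] else nd ++ [d]) []
  String.ofList (pvFmt random_string [new_data, new_data, new_data])

-- ===== PORT B =====
def pvTrans : PySem.Dict Char Char :=
  (PySem.List.enumerate pvFreq 0).foldl
    (fun d p => d.insert p.2 (PySem.List.pyGetD pvFreq (-1 - p.1) ' '))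
    PySem.Dict.empty

def augment_data_alt (data : String) : String :=
  let present : PySem.Set Char := PySem.Set.ofList data.toList
  let masked := pvTemplate.map (fun c => if PySem.Set.contains present c then '*' else c)
  let new_data := PySem.Chars.join [] (data.toList.map (fun c => [pvTrans.getD c c]))
  String.ofList (pvFmt masked [new_data, new_data, new_data])

-- ===== PRECONDITION & SPEC =====
-- Pre_ excludes exactly the inputs containing one of '{' and '}' without the other: there A's
-- (and B's) final str.format raises ValueError on the stray brace left in the masked template.
def Pre_augment_data (data : String) : Prop := ('{' ∈ data.toList ↔ '}' ∈ data.toList)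
instance (data : String) : Decidable (Pre_augment_data data) := by unfold Pre_augment_data; infer_instance
def pvWitness_augment_data : String := "abc"
def Spec_augment_data (data : String) (out : String) : Prop := out = augment_data_alt data
instance (data : String) (out : String) : Decidable (Spec_augment_data data out) := by unfold Spec_augment_data; infer_instance

-- ===== CLAIM (what is proved, stated in full; the proofs are below) =====
def Claim_equal_augment_data : Prop := ∀ (data : String), Dom_augment_data data → Pre_augment_data data → Spec_augment_data data (augment_data data)

-- ===== LEMMAS AND PROOFS =====

-- the two reversed-frequency dictionaries are the same concrete 26-entry dictionary
theorem pv_dict_eq : pvSampleDict = pvTrans := by decide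

-- replace.go with a single-character pattern is a pointwise map
theorem pv_go_single (d : Char) :
    ∀ (fuel : Nat) (l acc : List Char), l.length ≤ fuel →
      PySem.Chars.replace.go [d] ['*'] fuel l acc
        = acc.reverse ++ l.map (fun c => if c = d then '*' else c) := by
  intro fuel
  induction fuel with
  | zero =>
    intro l acc h
    have : l = [] := List.eq_nil_of_length_eq_zero (Nat.le_zero.mp h)
    subst this
    simp [PySem.Chars.replace.go]
  | succ n ih =>
    intro l acc h
    cases l with
    | nil => simp [PySem.Chars.replace.go]
    | cons c t =>
      by_cases hc : c = d
      · subst hc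
        have hpre : List.isPrefixOf [c] (c :: t) = true := by
          simp [List.isPrefixOf]
        simp only [PySem.Chars.replace.go, hpre]
        rw [if_pos trivial, ih _ _ (by simpa using Nat.le_of_succ_le_succ h)]
        simp
      · have hpre : List.isPrefixOf [d] (c :: t) = false := by
          simp [List.isPrefixOf]
          intro hdc; exact absurd hdc.symm hc
        simp only [PySem.Chars.replace.go, hpre]
        rw [if_neg (by simp : ¬ (false = true)), ih _ _ (by simpa using Nat.le_of_succ_le_succ h)]
        simp [hc]

theorem pv_replace_single (s : List Char) (d : Char) :
    PySem.Chars.replace s [d] ['*'] = s.map (fun c => if c = d then '*' else c) := by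
  simp only [PySem.Chars.replace, List.isEmpty]
  rw [if_neg (by simp)]
  simpa using pv_go_single d s.length s [] (le_refl _)

-- folding single-character replaces over ds masks exactly the characters of ds
theorem pv_mask_fold (ds : List Char) :
    ∀ (t P : List Char),
      ds.foldl (fun s d => PySem.Chars.replace s [d] ['*'])
          (t.map (fun c => if c ∈ P then '*' else c))
        = t.map (fun c => if c ∈ P ++ ds then '*' else c) := by
  induction ds with
  | nil => intro t P; simp
  | cons d ds ih =>
    intro t P
    simp only [List.foldl_cons]
    rw [pv_replace_single, List.map_map]
    have hstep :
        ((fun c => if c = d then '*' else c) ∘ fun c => if c ∈ P then '*' else c)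
          = fun c => if c ∈ P ++ [d] then '*' else c := by
      funext c
      by_cases hP : c ∈ P
      · simp [Function.comp, hP]
      · by_cases hd : c = d
        · subst hd; simp [Function.comp, hP]
        · simp [Function.comp, hP, hd]
    rw [hstep, ih t (P ++ [d])]
    simp

-- ===== VERDICT (by name: the statement is the Claim_ definition above) =====
theorem augment_data_spec : Claim_equal_augment_data := by
  intro data _ _
  unfold Spec_augment_data augment_data augment_data_alt
  have hmask : ∀ t : List Char,
      data.toList.foldl (fun s d => PySem.Chars.replace s [d] ['*']) t
        = t.map (fun c =>
            if PySem.Set.contains (PySem.Set.ofList data.toList) c then '*' else c) := by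
    intro t
    have h0 : t = t.map (fun c => if c ∈ ([] : List Char) then '*' else c) := by
      simp
    conv_lhs => rw [h0]
    rw [pv_mask_fold data.toList t []]
    simp only [List.nil_append]
    apply List.map_congr_left
    intro c _
    by_cases hc : c ∈ data.toList
    · rw [if_pos hc, if_pos ((PySem.Set.contains_iff _ _).mpr ((PySem.Set.mem_ofList _ _).mpr hc))]
    · rw [if_neg hc, if_neg (by
        intro hcontra
        exact hc ((PySem.Set.mem_ofList _ _).mp ((PySem.Set.contains_iff _ _).mp hcontra)))]
  have hnew :
      data.toList.foldl
          (fun nd d => if pvSampleDict.contains d then nd ++ [pvSampleDict.getD d d] else nd ++ [d]) []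
        = PySem.Chars.join [] (data.toList.map (fun c => [pvTrans.getD c c])) := by
    have hstep :
        (fun (nd : List Char) d =>
            if pvSampleDict.contains d then nd ++ [pvSampleDict.getD d d] else nd ++ [d])
          = fun nd d => nd ++ [pvTrans.getD d d] := by
      funext nd d
      rw [← pv_dict_eq]
      by_cases h : pvSampleDict.contains d
      · rw [if_pos h]
      · rw [if_neg h, PySem.Dict.getD_of_not_contains pvSampleDict d (by simpa using h)]
    rw [hstep, PySem.List.foldl_append_singleton_eq_map]
    have : data.toList.map (fun c => [pvTrans.getD c c])
        = (data.toList.map (fun c => pvTrans.getD c c)).map (fun c => [c]) := by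
      simp [List.map_map]
    rw [this, PySem.Chars.join_nil_singletons]
    simp
  simp only [hmask pvTemplate, hnew]
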